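-- pv_equiv track=rewrite | github.com/sibeni-li/AoC-solutions | 2024/Day 5/day5.py | make_valid_sequences
-- ===== SOURCE A (Python) =====
-- def find_applicable_rules(rules, sequences):
--     all_applicable_rules = []
--     for sequence in sequences:
--         applicable_rules = []
--         for rule in rules:
--             both_present = rule[0] in sequence and rule[1] in sequence
--             if both_present:
--                 applicable_rules.append(rule)
--         all_applicable_rules.append(applicable_rules)
--         applicable_rules = []
--     return all_applicable_rules
--
-- def find_invalid_sequences(rules, sequences):
--     invalid_sequences = []
--     for i, sequence in enumerate(sequences):
--         applicable_rules = find_applicable_rules(rules, sequences)[i]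
--         rules_unfollowed = []
--         for rule in applicable_rules:
--             pos_a = sequence.index(rule[0])
--             pos_b = sequence.index(rule[1])
--             rules_unfollowed.append(pos_a < pos_b)
--         if not all(rules_unfollowed):
--             invalid_sequences.append(sequence)
--     return invalid_sequences
--
-- def make_valid_sequences(rules, sequences):
--     invalid_sequences = find_invalid_sequences(rules, sequences)
--     new_applicable_rules = find_applicable_rules(rules, invalid_sequences)
--     sorted_sequences = []
--     for i, sequence in enumerate(invalid_sequences):
--         its_rules = new_applicable_rules[i]
--         must_come_before = {num: 0 for num in sequence}
--         for rule in its_rules: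
--             must_come_before[rule[1]] += 1
--         sorted_pairs = sorted(must_come_before.items(), key=lambda x: x[1])
--         sorted_sequence = [pair[0] for pair in sorted_pairs]
--         sorted_sequences.append(sorted_sequence)
--     return sorted_sequences
-- ===== SOURCE B (Python) =====
-- def make_valid_sequences(rules, sequences):
--     out = []
--     for seq in sequences:
--         app = [r for r in rules if r[0] in seq and r[1] in seq]
--         if all(seq.index(a) < seq.index(b) for a, b in app):
--             continue
--         counts = {}
--         for x in seq:
--             counts.setdefault(x, 0)
--         for _, b in app:
--             counts[b] += 1
--         buckets = [[] for _ in range(len(app) + 1)]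
--         for x, c in counts.items():
--             buckets[c].append(x)
--         out.append([x for bucket in buckets for x in bucket])
--     return out
-- ===== Notes on version B (the rewrite author's own statement) =====
-- stated objective: faster
-- what changed: One pass over the sequences (A calls find_applicable_rules over ALL sequences again for every single sequence, quadratic in the number of sequences), and the stable sorted() by count is replaced by a counting/bucket sort: elements are appended to buckets[count] in first-appearance order and the buckets concatenated.
import Mathlib
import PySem

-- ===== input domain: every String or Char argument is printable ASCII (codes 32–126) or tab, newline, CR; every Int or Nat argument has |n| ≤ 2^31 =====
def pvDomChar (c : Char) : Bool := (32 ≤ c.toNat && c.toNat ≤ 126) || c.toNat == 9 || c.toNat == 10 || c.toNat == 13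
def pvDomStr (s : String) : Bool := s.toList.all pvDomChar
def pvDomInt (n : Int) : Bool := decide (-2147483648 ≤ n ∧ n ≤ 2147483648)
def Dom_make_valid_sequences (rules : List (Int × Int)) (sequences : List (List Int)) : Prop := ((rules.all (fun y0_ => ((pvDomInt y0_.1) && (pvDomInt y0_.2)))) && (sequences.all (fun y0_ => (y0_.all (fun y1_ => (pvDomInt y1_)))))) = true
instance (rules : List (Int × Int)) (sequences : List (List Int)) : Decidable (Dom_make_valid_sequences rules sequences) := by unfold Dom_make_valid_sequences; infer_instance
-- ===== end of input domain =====

-- B makes one pass over the sequences (A re-runs find_applicable_rules over ALL sequences for every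
-- single sequence) and replaces the stable sorted()-by-count by a counting/bucket sort: faster.

-- ===== PORT A =====
def find_applicable_rules (rules : List (Int × Int)) (sequences : List (List Int)) : List (List (Int × Int)) :=
  sequences.foldl (fun all_app seq =>
    let app := rules.foldl (fun acc r =>
      let both := seq.contains r.1 && seq.contains r.2
      if both then acc ++ [r] else acc) []
    all_app ++ [app]) []

def find_invalid_sequences (rules : List (Int × Int)) (sequences : List (List Int)) : List (List Int) :=
  (PySem.List.enumerate sequences 0).foldl (fun inv p =>
    -- Python's list indexing [i] never raises here (i = enumerate index); pyGetD with default [] is exact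
    let app := PySem.List.pyGetD (find_applicable_rules rules sequences) p.1 []
    -- sequence.index never raises here (both rule members are in the sequence); .getD 0 is exact
    let unf := app.foldl (fun acc r =>
      acc ++ [decide (((PySem.List.index? p.2 r.1).getD 0) < ((PySem.List.index? p.2 r.2).getD 0))]) ([] : List Bool)
    if !(unf.all (fun b => b)) then inv ++ [p.2] else inv) []

def make_valid_sequences (rules : List (Int × Int)) (sequences : List (List Int)) : List (List Int) :=
  let invalid := find_invalid_sequences rules sequences
  let new_app := find_applicable_rules rules invalid
  (PySem.List.enumerate invalid 0).foldl (fun out p =>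
    let its := PySem.List.pyGetD new_app p.1 []
    let mcb0 : PySem.Dict Int Int := p.2.foldl (fun d num => d.insert num 0) PySem.Dict.empty
    -- Python's `must_come_before[rule[1]] += 1` never sees a missing key (rule[1] ∈ sequence); modify with default 0 is exact
    let mcb := its.foldl (fun d r => d.modify r.2 0 (· + 1)) mcb0
    let pairs := PySem.List.sorted mcb.items (fun q => q.2) false
    out ++ [pairs.map (fun q => q.1)]) []

-- ===== PORT B =====
def make_valid_sequences_alt (rules : List (Int × Int)) (sequences : List (List Int)) : List (List Int) :=
  sequences.foldl (fun out seq =>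
    let app := rules.filter (fun r => seq.contains r.1 && seq.contains r.2)
    -- seq.index never raises here (both rule members are in seq); .getD 0 is exact
    if app.all (fun r => decide (((PySem.List.index? seq r.1).getD 0) < ((PySem.List.index? seq r.2).getD 0))) then out
    else
      let counts0 : PySem.Dict Int Int := seq.foldl (fun d x => d.setdefault x 0) PySem.Dict.empty
      let counts := app.foldl (fun d r => d.modify r.2 0 (· + 1)) counts0
      -- bucket index c is a count, always ≥ 0, so .toNat is exact
      let buckets := counts.items.foldl (fun bs q => bs.modify q.2.toNat (fun b => b ++ [q.1]))
        (List.replicate (app.length + 1) ([] : List Int))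
      out ++ [buckets.flatten]) []

-- ===== PRECONDITION & SPEC =====
def Spec_make_valid_sequences (rules : List (Int × Int)) (sequences : List (List Int)) (out : List (List Int)) : Prop := out = make_valid_sequences_alt rules sequences
instance (rules : List (Int × Int)) (sequences : List (List Int)) (out : List (List Int)) : Decidable (Spec_make_valid_sequences rules sequences out) := by unfold Spec_make_valid_sequences; infer_instance

-- ===== CLAIM (what is proved, stated in full; the proofs are below) =====
def Claim_equal_make_valid_sequences : Prop := ∀ (rules : List (Int × Int)) (sequences : List (List Int)), Dom_make_valid_sequences rules sequences → Spec_make_valid_sequences rules sequences (make_valid_sequences rules sequences)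

-- ===== LEMMAS AND PROOFS =====

theorem find_applicable_eq_map (rules : List (Int × Int)) (l : List (List Int)) :
    find_applicable_rules rules l
      = l.map (fun seq => rules.filter (fun r => seq.contains r.1 && seq.contains r.2)) := by
  simp only [find_applicable_rules, PySem.List.foldl_append_if_eq_filter, PySem.List.foldl_append_singleton_eq_map, List.nil_append]

theorem enum_fold_getD {α β γ : Type} (F : α → γ) (dflt : γ) (G : List β → α → γ → List β) :
    ∀ (l L : List α) (s : Nat) (acc : List β), L.drop s = l →
    (PySem.List.enumerate l (s : Int)).foldl
        (fun acc p => G acc p.2 (PySem.List.pyGetD (L.map F) p.1 dflt)) acc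
      = l.foldl (fun acc x => G acc x (F x)) acc := by
  intro l
  induction l with
  | nil => intro L s acc h; simp [PySem.List.enumerate]
  | cons x t ih =>
    intro L s acc h
    have hget : L[s]? = some x := by
      have h0 : (L.drop s)[0]? = some x := by rw [h]; rfl
      simpa using h0
    have hdrop : L.drop (s + 1) = t := by
      have : (L.drop s).drop 1 = t := by rw [h]; rfl
      simpa [List.drop_drop] using this
    simp only [PySem.List.enumerate, List.foldl_cons]
    rw [show ((s : Int) + 1) = ((s + 1 : Nat) : Int) by push_cast; ring]
    rw [ih L (s + 1) _ hdrop]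
    congr 1
    rw [PySem.List.pyGetD_natCast, List.getD_eq_getElem?_getD, List.getElem?_map, hget]
    rfl

theorem enum_fold_getD0 {α β γ : Type} (F : α → γ) (dflt : γ) (G : List β → α → γ → List β)
    (l : List α) (acc : List β) :
    (PySem.List.enumerate l 0).foldl
        (fun acc p => G acc p.2 (PySem.List.pyGetD (l.map F) p.1 dflt)) acc
      = l.foldl (fun acc x => G acc x (F x)) acc := by
  have h := enum_fold_getD F dflt G l l 0 acc rfl
  exact_mod_cast h

theorem insertBy_split {α : Type} (before : α → α → Bool) (x : α) :
    ∀ (A B : List α), (∀ a ∈ A, before x a = false) → (∀ b ∈ B, before x b = true) →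
    PySem.List.insertBy before x (A ++ B) = A ++ x :: B := by
  intro A
  induction A with
  | nil =>
    intro B _ hB
    cases B with
    | nil => simp [PySem.List.insertBy]
    | cons b bs => simp [PySem.List.insertBy, hB b (by simp)]
  | cons a A' ih =>
    intro B hA hB
    simp only [List.cons_append, PySem.List.insertBy, hA a (by simp), Bool.false_eq_true, if_false]
    rw [ih B (fun a ha => hA a (by simp [ha])) hB]

theorem flatMap_congr_mem {α β : Type} {l : List α} {f g : α → List β}
    (h : ∀ a ∈ l, f a = g a) : l.flatMap f = l.flatMap g := by
  simp only [List.flatMap]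
  exact congrArg List.flatten (List.map_congr_left h)

theorem sorted_buckets (n : Nat) :
    ∀ (l : List (Int × Int)), (∀ p ∈ l, 0 ≤ p.2 ∧ p.2 ≤ (n : Int)) →
    PySem.List.sorted l (fun q => q.2) false
      = (List.range (n + 1)).flatMap (fun (j : Nat) => l.filter (fun q => q.2 == (j : Int))) := by
  intro l
  induction l using List.reverseRecOn with
  | nil => intro _; simp [PySem.List.sorted]
  | append_singleton l x ih =>
    intro h
    have hx := h x (by simp)
    have hl : ∀ p ∈ l, 0 ≤ p.2 ∧ p.2 ≤ (n : Int) := fun p hp => h p (by simp [hp])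
    set k := x.2.toNat with hkdef
    have hk : (k : Int) = x.2 := Int.toNat_of_nonneg hx.1
    have hkn : k ≤ n := by omega
    -- one insertion step of the stable sort
    have hstep : PySem.List.sorted (l ++ [x]) (fun q => q.2) false
        = PySem.List.insertBy (fun a b => decide (a.2 < b.2)) x
            (PySem.List.sorted l (fun q => q.2) false) := by
      rw [PySem.List.sorted_eq_foldl_insertBy, PySem.List.sorted_eq_foldl_insertBy,
        List.foldl_append]
      rfl
    rw [hstep, ih hl]
    -- split the bucket range at k
    have hsplit : List.range (n + 1) = List.range (k + 1) ++ List.range' (k + 1) (n - k) := by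
      rw [List.range_eq_range']
      rw [show List.range' 0 (n+1) = List.range' 0 ((k+1) + (n-k)) by congr 1; omega]
      rw [← List.range'_append (s := 0) (m := k+1) (n := n-k) (step := 1)]
      rw [List.range_eq_range']
      norm_num
    set f : Nat → List (Int × Int) := fun j => l.filter (fun q => q.2 == (j : Int)) with hf
    set f' : Nat → List (Int × Int) := fun j => (l ++ [x]).filter (fun q => q.2 == (j : Int)) with hf'
    set A := (List.range (k + 1)).flatMap f with hA
    set B := (List.range' (k + 1) (n - k)).flatMap f with hB
    have memA : ∀ a ∈ A, a.2 ≤ (k : Int) := by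
      intro a ha
      rw [hA, List.mem_flatMap] at ha
      obtain ⟨j, hj, haj⟩ := ha
      rw [List.mem_range] at hj
      have := (List.mem_filter.mp haj).2
      have : a.2 = (j : Int) := by exact_mod_cast of_decide_eq_true this
      omega
    have memB : ∀ b ∈ B, (k : Int) < b.2 := by
      intro b hb
      rw [hB, List.mem_flatMap] at hb
      obtain ⟨j, hj, hbj⟩ := hb
      rw [List.mem_range'] at hj
      obtain ⟨i, hi, rfl⟩ := hj
      have := (List.mem_filter.mp hbj).2
      have : b.2 = ((k + 1 + 1 * i : Nat) : Int) := by exact_mod_cast of_decide_eq_true this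
      push_cast at this
      omega
    have hLHS : PySem.List.insertBy (fun a b => decide (a.2 < b.2)) x
        ((List.range (n + 1)).flatMap f) = A ++ x :: B := by
      rw [hsplit, List.flatMap_append]
      exact insertBy_split _ x A B
        (fun a ha => by simp only [decide_eq_false_iff_not, not_lt]; rw [← hk]; exact memA a ha)
        (fun b hb => by simp only [decide_eq_true_eq]; rw [← hk]; exact memB b hb)
    rw [hLHS, hsplit, List.flatMap_append]
    -- right part: buckets above k are unchanged by appending x
    have hright : (List.range' (k + 1) (n - k)).flatMap f' = B := by
      rw [hB]
      apply flatMap_congr_mem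
      intro j hj
      rw [List.mem_range'] at hj
      obtain ⟨i, hi, rfl⟩ := hj
      simp only [hf, hf']
      rw [List.filter_append]
      simp only [List.filter_cons, List.filter_nil]
      rw [show (x.2 == ((k + 1 + 1 * i : Nat) : Int)) = false by rw [beq_eq_false_iff_ne, ← hk]; push_cast; omega]
      simp
    -- left part: bucket k gains x at its end
    have hleft : (List.range (k + 1)).flatMap f' = A ++ [x] := by
      rw [List.range_succ, List.flatMap_append]
      have h1 : (List.range k).flatMap f' = (List.range k).flatMap f := by
        apply flatMap_congr_mem
        intro j hj
        rw [List.mem_range] at hj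
        simp only [hf, hf']
        rw [List.filter_append]
        simp only [List.filter_cons, List.filter_nil]
        rw [show (x.2 == (j : Int)) = false by rw [beq_eq_false_iff_ne, ← hk]; omega]
        simp
      have h2 : f' k = f k ++ [x] := by
        simp only [hf, hf']
        rw [List.filter_append]
        simp only [List.filter_cons, List.filter_nil]
        rw [show (x.2 == (k : Int)) = true by rw [beq_iff_eq, ← hk]]
        simp
      simp only [List.flatMap_cons, List.flatMap_nil, List.append_nil]
      rw [h1, h2, hA, List.range_succ, List.flatMap_append]
      simp
    rw [hright, hleft]
    simp

theorem bucket_foldl :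
    ∀ (l : List (Int × Int)) (bs : List (List Int)), (∀ p ∈ l, 0 ≤ p.2 ∧ p.2.toNat < bs.length) →
    l.foldl (fun bs q => bs.modify q.2.toNat (fun b => b ++ [q.1])) bs
      = (List.range bs.length).map
          (fun j => bs.getD j [] ++ (l.filter (fun q => q.2 == (j : Int))).map (fun q => q.1)) := by
  intro l
  induction l with
  | nil =>
    intro bs _
    simp only [List.foldl_nil, List.filter_nil, List.map_nil, List.append_nil]
    apply List.ext_getElem
    · simp
    · intro i h1 h2
      simp [List.getD_eq_getElem?_getD, List.getElem?_eq_getElem h1]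
  | cons q t ih =>
    intro bs h
    have hq := h q (by simp)
    have ht : ∀ p ∈ t, 0 ≤ p.2 ∧ p.2.toNat < (bs.modify q.2.toNat (fun b => b ++ [q.1])).length := by
      intro p hp
      rw [List.length_modify]
      exact h p (by simp [hp])
    rw [List.foldl_cons, ih _ ht, List.length_modify]
    apply List.map_congr_left
    intro j hj
    rw [List.mem_range] at hj
    have hgetD : (bs.modify q.2.toNat (fun b => b ++ [q.1])).getD j []
        = if q.2.toNat = j then bs.getD j [] ++ [q.1] else bs.getD j [] := by
      rw [List.getD_eq_getElem?_getD, List.getElem?_modify]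
      rw [List.getD_eq_getElem?_getD, List.getElem?_eq_getElem hj]
      split_ifs <;> simp
    rw [hgetD]
    have hbeq : (q.2 == (j : Int)) = decide (q.2.toNat = j) := by
      rcases hq with ⟨h0, _⟩
      by_cases hc : q.2.toNat = j
      · subst hc; simp [Int.toNat_of_nonneg h0]
      · simp only [hc, decide_false, beq_eq_false_iff_ne]
        intro he; exact hc (by rw [he]; simp)
    rw [List.filter_cons, hbeq]
    by_cases hc : q.2.toNat = j
    · simp [hc]
    · simp [hc]

theorem init_dicts_eq (seq : List Int) :
    ∀ (d : PySem.Dict Int Int), (∀ p ∈ d.items, p.2 = (0 : Int)) →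
    seq.foldl (fun d x => d.insert x 0) d = seq.foldl (fun d x => d.setdefault x 0) d := by
  induction seq with
  | nil => intro d _; rfl
  | cons x t ih =>
    intro d hd
    have hinv : ∀ p ∈ (d.insert x 0).items, p.2 = (0 : Int) := by
      intro p hp
      rcases (PySem.Dict.mem_items_insert d x 0 p).mp hp with h | h
      · rw [h]
      · exact hd p h.1
    by_cases hc : d.contains x
    · have heq : d.insert x 0 = d := by
        apply PySem.Dict.ext
        rw [PySem.Dict.items_insert_of_contains d 0 hc]
        have : ∀ p ∈ d.items, (if p.1 == x then ((x, 0) : Int × Int) else p) = p := by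
          intro p hp
          by_cases hb : p.1 == x
          · simp only [hb, if_true]
            have h1 : p.1 = x := by exact_mod_cast eq_of_beq hb
            have h2 : p.2 = 0 := hd p hp
            rw [← h1, ← h2]
          · simp [hb]
        rw [List.map_congr_left this]; simp
      simp only [List.foldl_cons]
      rw [PySem.Dict.setdefault_of_contains d 0 hc, heq]
      exact ih d hd
    · simp only [List.foldl_cons]
      rw [PySem.Dict.setdefault_of_not_contains d 0 (by simpa using hc)]
      exact ih _ hinv

theorem init_getD_zero (seq : List Int) :
    ∀ (d : PySem.Dict Int Int) (k : Int), d.getD k 0 = 0 →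
    (seq.foldl (fun d x => d.insert x 0) d).getD k 0 = 0 := by
  induction seq with
  | nil => intro d k h; exact h
  | cons x t ih =>
    intro d k h
    refine ih _ k ?_
    rw [PySem.Dict.getD_insert]
    split_ifs <;> simp [h]

-- the skip-form of the append-filter loop (B's `continue`)
theorem foldl_skip_if {α β : Type} (p : α → Bool) (f : α → β) (l : List α) (acc : List β) :
    l.foldl (fun acc x => if p x then acc else acc ++ [f x]) acc
      = acc ++ (l.filter (fun x => !p x)).map f := by
  rw [← PySem.List.foldl_append_if (fun x => !p x) f]
  apply PySem.List.foldl_congr_mem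
  intro acc x _
  by_cases h : p x <;> simp [h]

theorem body_eq (seq : List Int) (its : List (Int × Int)) :
    (PySem.List.sorted
        ((its.foldl (fun d r => d.modify r.2 0 (· + 1))
            (seq.foldl (fun d num => d.insert num 0) (PySem.Dict.empty : PySem.Dict Int Int))).items)
        (fun q => q.2) false).map (fun q => q.1)
      = ((its.foldl (fun d r => d.modify r.2 0 (· + 1))
            (seq.foldl (fun d x => d.setdefault x 0) (PySem.Dict.empty : PySem.Dict Int Int))).items.foldl
          (fun bs q => bs.modify q.2.toNat (fun b => b ++ [q.1]))
          (List.replicate (its.length + 1) ([] : List Int))).flatten := by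
  rw [← init_dicts_eq seq (PySem.Dict.empty : PySem.Dict Int Int) (by intro p hp; simp [PySem.Dict.empty] at hp)]
  set d := its.foldl (fun d r => d.modify r.2 0 (· + 1))
      (seq.foldl (fun d num => d.insert num 0) (PySem.Dict.empty : PySem.Dict Int Int)) with hdd
  have hnodinit : (seq.foldl (fun d num => d.insert num 0) (PySem.Dict.empty : PySem.Dict Int Int)).keys.Nodup :=
    PySem.Dict.nodup_keys_foldl_insert seq (fun _ _ => 0) (PySem.Dict.empty : PySem.Dict Int Int) PySem.Dict.nodup_keys_empty
  have hnod : d.keys.Nodup := by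
    rw [hdd]
    exact PySem.Dict.nodup_keys_foldl_modify_key its (fun r => r.2) 0 (fun _ _ => (· + 1)) _ hnodinit
  have hgetD : ∀ k, d.getD k 0 = ((its.map (fun r => r.2)).count k : Int) := by
    intro k
    rw [hdd, ← List.foldl_map (g := fun (d : PySem.Dict Int Int) (x : Int) => d.modify x 0 (· + 1)) (f := fun (r : Int × Int) => r.2) (l := its)]
    rw [PySem.Dict.getD_foldl_modify_add_one]
    rw [init_getD_zero seq (PySem.Dict.empty : PySem.Dict Int Int) k (by simp [PySem.Dict.empty, PySem.Dict.getD, PySem.Dict.get?])]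
    simp
  have hval : ∀ p ∈ d.items, 0 ≤ p.2 ∧ p.2 ≤ (its.length : Int) := by
    intro p hp
    rw [PySem.Dict.items_eq_map_keys d hnod 0] at hp
    rw [List.mem_map] at hp
    obtain ⟨k, _, rfl⟩ := hp
    dsimp only
    rw [hgetD k]
    constructor
    · positivity
    · have : (its.map (fun r => r.2)).count k ≤ its.length := by
        calc (its.map (fun r => r.2)).count k ≤ (its.map (fun r => r.2)).length := List.count_le_length
          _ = its.length := by simp
      exact_mod_cast this
  rw [sorted_buckets its.length d.items hval]
  rw [bucket_foldl d.items (List.replicate (its.length + 1) []) ?hb]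
  case hb =>
    intro p hp
    have := hval p hp
    rw [List.length_replicate]
    omega
  rw [List.length_replicate, List.map_flatMap]
  rw [List.flatten_eq_flatMap, List.flatMap_map]
  apply List.flatMap_congr
  intro j hj
  rw [List.mem_range] at hj
  simp [List.getD_eq_getElem?_getD, hj]

theorem make_A_shape (rules : List (Int × Int)) (sequences : List (List Int)) :
    make_valid_sequences rules sequences
      = (find_invalid_sequences rules sequences).map (fun seq =>
          (PySem.List.sorted
            (((rules.filter (fun r => seq.contains r.1 && seq.contains r.2)).foldl
                (fun d r => d.modify r.2 0 (· + 1))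
                (seq.foldl (fun d num => d.insert num 0) (PySem.Dict.empty : PySem.Dict Int Int))).items)
            (fun q => q.2) false).map (fun q => q.1)) := by
  simp only [make_valid_sequences]
  rw [find_applicable_eq_map]
  refine Eq.trans (enum_fold_getD0
    (F := fun (seq : List Int) => rules.filter (fun r => seq.contains r.1 && seq.contains r.2))
    (dflt := ([] : List (Int × Int)))
    (G := fun (out : List (List Int)) (seq : List Int) (its : List (Int × Int)) => out ++ [(PySem.List.sorted
      ((its.foldl (fun d r => d.modify r.2 0 (· + 1))
        (seq.foldl (fun d num => d.insert num 0) (PySem.Dict.empty : PySem.Dict Int Int))).items)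
      (fun q => q.2) false).map (fun q => q.1)])
    (find_invalid_sequences rules sequences) []) ?_
  refine Eq.trans (PySem.List.foldl_append_singleton_eq_map
    (f := fun (seq : List Int) => (PySem.List.sorted
      (((rules.filter (fun r => seq.contains r.1 && seq.contains r.2)).foldl
        (fun d r => d.modify r.2 0 (· + 1))
        (seq.foldl (fun d num => d.insert num 0) (PySem.Dict.empty : PySem.Dict Int Int))).items)
      (fun q => q.2) false).map (fun q => q.1)) _ _) ?_
  simp

theorem invalid_shape (rules : List (Int × Int)) (sequences : List (List Int)) :
    find_invalid_sequences rules sequences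
      = sequences.filter (fun seq =>
          !(rules.filter (fun r => seq.contains r.1 && seq.contains r.2)).all
            (fun r => decide (((PySem.List.index? seq r.1).getD 0) < ((PySem.List.index? seq r.2).getD 0)))) := by
  simp only [find_invalid_sequences]
  rw [find_applicable_eq_map]
  refine Eq.trans (enum_fold_getD0
    (F := fun (seq : List Int) => rules.filter (fun r => seq.contains r.1 && seq.contains r.2))
    (dflt := ([] : List (Int × Int)))
    (G := fun (inv : List (List Int)) (seq : List Int) (its : List (Int × Int)) =>
      if !((its.foldl (fun acc r =>
        acc ++ [decide (((PySem.List.index? seq r.1).getD 0) < ((PySem.List.index? seq r.2).getD 0))]) ([] : List Bool)).all (fun b => b))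
      then inv ++ [seq] else inv)
    sequences []) ?_
  have hbody : ∀ (acc : List (List Int)) (seq : List Int), seq ∈ sequences →
      (if !(((rules.filter (fun r => seq.contains r.1 && seq.contains r.2)).foldl (fun acc r =>
            acc ++ [decide (((PySem.List.index? seq r.1).getD 0) < ((PySem.List.index? seq r.2).getD 0))]) ([] : List Bool)).all (fun b => b))
        then acc ++ [seq] else acc)
      = (if !(rules.filter (fun r => seq.contains r.1 && seq.contains r.2)).all
            (fun r => decide (((PySem.List.index? seq r.1).getD 0) < ((PySem.List.index? seq r.2).getD 0)))
        then acc ++ [seq] else acc) := by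
    intro acc seq _
    rw [PySem.List.foldl_append_singleton_eq_map, List.nil_append, List.all_map]
    rfl
  refine Eq.trans (PySem.List.foldl_congr_mem _ _ _ _ hbody) ?_
  refine Eq.trans (PySem.List.foldl_append_if_eq_filter _ sequences []) ?_
  simp

theorem alt_shape (rules : List (Int × Int)) (sequences : List (List Int)) :
    make_valid_sequences_alt rules sequences
      = (sequences.filter (fun seq =>
          !(rules.filter (fun r => seq.contains r.1 && seq.contains r.2)).all
            (fun r => decide (((PySem.List.index? seq r.1).getD 0) < ((PySem.List.index? seq r.2).getD 0))))).map
          (fun seq =>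
            (((rules.filter (fun r => seq.contains r.1 && seq.contains r.2)).foldl
                (fun d r => d.modify r.2 0 (· + 1))
                (seq.foldl (fun d x => d.setdefault x 0) (PySem.Dict.empty : PySem.Dict Int Int))).items.foldl
              (fun bs q => bs.modify q.2.toNat (fun b => b ++ [q.1]))
              (List.replicate ((rules.filter (fun r => seq.contains r.1 && seq.contains r.2)).length + 1) ([] : List Int))).flatten) := by
  simp only [make_valid_sequences_alt]
  refine Eq.trans (foldl_skip_if
    (p := fun (seq : List Int) => (rules.filter (fun r => seq.contains r.1 && seq.contains r.2)).all
      (fun r => decide (((PySem.List.index? seq r.1).getD 0) < ((PySem.List.index? seq r.2).getD 0))))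
    (f := fun (seq : List Int) =>
      (((rules.filter (fun r => seq.contains r.1 && seq.contains r.2)).foldl
          (fun d r => d.modify r.2 0 (· + 1))
          (seq.foldl (fun d x => d.setdefault x 0) (PySem.Dict.empty : PySem.Dict Int Int))).items.foldl
        (fun bs q => bs.modify q.2.toNat (fun b => b ++ [q.1]))
        (List.replicate ((rules.filter (fun r => seq.contains r.1 && seq.contains r.2)).length + 1) ([] : List Int))).flatten)
    sequences []) ?_
  simp

-- ===== VERDICT (by name: the statement is the Claim_ definition above) =====
theorem make_valid_sequences_spec : Claim_equal_make_valid_sequences := by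
  intro rules sequences _
  unfold Spec_make_valid_sequences
  rw [make_A_shape, invalid_shape, alt_shape]
  apply List.map_congr_left
  intro seq _
  exact body_eq seq _
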